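-- pv_equiv track=rewrite | github.com/Ernyoke/codeforces-py | integer_diversity.py | solve
-- ===== SOURCE A (Python) =====
-- def solve(a):
--     unique = set()
--     for value in a:
--         if value == 0:
--             unique.add(value)
--         elif value not in unique:
--             unique.add(value)
--         else:
--             unique.add(-value)
--     return len(unique)
-- ===== SOURCE B (Python) =====
-- def solve(a):
--     counts = {}
--     for v in a:
--         counts[v] = counts.get(v, 0) + 1
--     s = set()
--     for v, c in counts.items():
--         s.add(v)
--         if v != 0 and c >= 2:
--             s.add(-v)
--     return len(s)
-- ===== Notes on version B (the rewrite author's own statement) =====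
-- stated objective: alternative
-- what changed: A simulates the set incrementally, deciding per occurrence via membership of the growing set; B first builds a frequency dict in one pass, then for each distinct value adds v and, if v is nonzero and occurs at least twice, -v, returning the set's size.
import Mathlib
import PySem

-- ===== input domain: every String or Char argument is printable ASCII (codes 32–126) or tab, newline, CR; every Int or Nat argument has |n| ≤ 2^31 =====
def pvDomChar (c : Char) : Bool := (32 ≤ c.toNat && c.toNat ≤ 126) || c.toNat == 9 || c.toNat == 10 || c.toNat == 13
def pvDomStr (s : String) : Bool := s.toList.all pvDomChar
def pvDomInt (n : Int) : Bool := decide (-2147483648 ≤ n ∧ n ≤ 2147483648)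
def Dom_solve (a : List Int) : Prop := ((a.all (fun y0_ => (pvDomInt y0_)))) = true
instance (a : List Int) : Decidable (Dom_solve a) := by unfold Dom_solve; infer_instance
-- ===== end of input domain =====

-- B replaces A's order-dependent incremental set simulation by a count-then-decide
-- pass over the distinct values (objective: alternative; same result, proved equal).

-- ===== PORT A =====
-- one loop iteration of A: if value == 0: add value; elif value not in unique: add value; else: add -value
def stepA (s : PySem.Set Int) (v : Int) : PySem.Set Int :=
  if v = 0 then s.add v
  else if ¬ (s.contains v = true) then s.add v
  else s.add (-v)

def solve (a : List Int) : Int :=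
  let unique := a.foldl stepA (PySem.Set.empty : PySem.Set Int)
  PySem.Set.len unique

-- ===== PORT B =====
-- one iteration of B's second loop: s.add(v); if v != 0 and c >= 2: s.add(-v)
def stepB (s : PySem.Set Int) (q : Int × Int) : PySem.Set Int :=
  let s' := s.add q.1
  if q.1 ≠ 0 ∧ 2 ≤ q.2 then s'.add (-q.1) else s'

def solve_alt (a : List Int) : Int :=
  let counts := a.foldl (fun d v => d.insert v (d.getD v 0 + 1)) (PySem.Dict.empty : PySem.Dict Int Int)
  let s := counts.items.foldl stepB (PySem.Set.empty : PySem.Set Int)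
  PySem.Set.len s

-- ===== PRECONDITION & SPEC =====
def Spec_solve (a : List Int) (out : Int) : Prop := out = solve_alt a
instance (a : List Int) (out : Int) : Decidable (Spec_solve a out) := by unfold Spec_solve; infer_instance

-- ===== CLAIM (what is proved, stated in full; the proofs are below) =====
def Claim_equal_solve : Prop := ∀ (a : List Int), Dom_solve a → Spec_solve a (solve a)

-- ===== LEMMAS AND PROOFS =====

-- the set both programs end up with, as a predicate on x: x occurs in p,
-- or x = -v for some nonzero v occurring at least twice in p
def inG (p : List Int) (x : Int) : Prop :=
  x ∈ p ∨ ∃ v, v ∈ p ∧ v ≠ 0 ∧ 2 ≤ p.count v ∧ x = -v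

lemma stepA_inG (p : List Int) (s : PySem.Set Int)
    (hs : ∀ x, x ∈ s ↔ inG p x) (v x : Int) :
    x ∈ stepA s v ↔ inG (p ++ [v]) x := by
  have hcnt : ∀ w : Int, (p ++ [v]).count w = p.count w + if w = v then 1 else 0 := by
    intro w; rw [List.count_append]
    by_cases h : w = v
    · subst h; simp
    · have h0 : List.count w [v] = 0 := List.count_eq_zero.mpr (by simp [h])
      rw [if_neg h, h0]
  unfold stepA
  unfold inG at hs ⊢
  by_cases hv0 : v = 0
  · subst hv0
    rw [if_pos rfl, PySem.Set.mem_add, hs]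
    constructor
    · rintro ((h | ⟨w, hw, hw0, hc, hx⟩) | h)
      · exact Or.inl (List.mem_append_left _ h)
      · exact Or.inr ⟨w, List.mem_append_left _ hw, hw0, by have := hcnt w; split_ifs at this <;> omega, hx⟩
      · exact Or.inl (List.mem_append_right _ (by simp [h]))
    · rintro (h | ⟨w, hw, hw0, hc, hx⟩)
      · rcases List.mem_append.mp h with h | h
        · exact Or.inl (Or.inl h)
        · simp at h; exact Or.inr h
      · have hwp : w ∈ p := by
          rcases List.mem_append.mp hw with h | h
          · exact h
          · simp at h; exact absurd h hw0
        have hcw : 2 ≤ p.count w := by have := hcnt w; rw [if_neg hw0] at this; omega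
        exact Or.inl (Or.inr ⟨w, hwp, hw0, hcw, hx⟩)
  · by_cases hc : s.contains v = true
    · -- value already in unique: add -value
      have hv := (hs v).mp ((PySem.Set.contains_iff s v).mp hc)
      rw [if_neg hv0, if_neg (not_not.mpr hc), PySem.Set.mem_add, hs]
      constructor
      · rintro ((h | ⟨w, hw, hw0, hcw, hx⟩) | h)
        · exact Or.inl (List.mem_append_left _ h)
        · exact Or.inr ⟨w, List.mem_append_left _ hw, hw0, by have := hcnt w; split_ifs at this <;> omega, hx⟩
        · -- x = -v
          rcases hv with hvp | ⟨w, hwp, hw0, hcw, hvw⟩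
          · exact Or.inr ⟨v, List.mem_append_right _ (by simp), hv0,
              by have h1 := hcnt v; rw [if_pos rfl] at h1; have h2 := List.count_pos_iff.mpr hvp; omega, h⟩
          · -- v = -w, w ∈ p with count ≥ 2; then x = -v = w ∈ p
            have hxw : x = w := by omega
            exact Or.inl (List.mem_append_left _ (hxw ▸ hwp))
      · rintro (h | ⟨w, hw, hw0, hcw, hx⟩)
        · rcases List.mem_append.mp h with h | h
          · exact Or.inl (Or.inl h)
          · simp at h; exact Or.inl (h ▸ hv)
        · by_cases hwv : w = v
          · subst hwv; exact Or.inr hx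
          · have hwp : w ∈ p := by
              rcases List.mem_append.mp hw with h | h
              · exact h
              · simp at h; exact absurd h hwv
            have hcw' : 2 ≤ p.count w := by have := hcnt w; rw [if_neg hwv] at this; omega
            exact Or.inl (Or.inr ⟨w, hwp, hw0, hcw', hx⟩)
    · -- value not in unique: add value
      have hv : ¬ (v ∈ p ∨ ∃ w, w ∈ p ∧ w ≠ 0 ∧ 2 ≤ p.count w ∧ v = -w) :=
        fun h => hc ((PySem.Set.contains_iff s v).mpr ((hs v).mpr h))
      have hvp : v ∉ p := fun h => hv (Or.inl h)
      have hcv : p.count v = 0 := List.count_eq_zero.mpr hvp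
      rw [if_neg hv0, if_pos hc, PySem.Set.mem_add, hs]
      constructor
      · rintro ((h | ⟨w, hw, hw0, hcw, hx⟩) | h)
        · exact Or.inl (List.mem_append_left _ h)
        · exact Or.inr ⟨w, List.mem_append_left _ hw, hw0, by have := hcnt w; split_ifs at this <;> omega, hx⟩
        · exact Or.inl (List.mem_append_right _ (by simp [h]))
      · rintro (h | ⟨w, hw, hw0, hcw, hx⟩)
        · rcases List.mem_append.mp h with h | h
          · exact Or.inl (Or.inl h)
          · simp at h; exact Or.inr h
        · by_cases hwv : w = v
          · subst hwv; have := hcnt w; rw [if_pos rfl] at this; omega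
          · have hwp : w ∈ p := by
              rcases List.mem_append.mp hw with h1 | h1
              · exact h1
              · simp at h1; exact absurd h1 hwv
            have hcw' : 2 ≤ p.count w := by have := hcnt w; rw [if_neg hwv] at this; omega
            exact Or.inl (Or.inr ⟨w, hwp, hw0, hcw', hx⟩)

lemma foldA_inG : ∀ (a p : List Int) (s : PySem.Set Int),
    (∀ x, x ∈ s ↔ inG p x) → ∀ x, x ∈ a.foldl stepA s ↔ inG (p ++ a) x := by
  intro a
  induction a with
  | nil => intro p s hs x; simpa using hs x
  | cons v a ih =>
    intro p s hs x
    have h1 : ∀ y, y ∈ stepA s v ↔ inG (p ++ [v]) y := stepA_inG p s hs v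
    have := ih (p ++ [v]) (stepA s v) h1 x
    simpa using this

lemma foldA_nodup : ∀ (a : List Int) (s : PySem.Set Int),
    s.Nodup → (a.foldl stepA s).Nodup := by
  intro a
  induction a with
  | nil => intro s hs; exact hs
  | cons v a ih =>
    intro s hs
    apply ih
    unfold stepA
    split_ifs <;> exact PySem.Set.nodup_add _ _ hs

lemma foldB_mem : ∀ (l : List (Int × Int)) (s : PySem.Set Int) (x : Int),
    x ∈ l.foldl stepB s ↔ x ∈ s ∨ ∃ q ∈ l, x = q.1 ∨ (q.1 ≠ 0 ∧ 2 ≤ q.2 ∧ x = -q.1) := by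
  intro l
  induction l with
  | nil => intro s x; simp
  | cons q l ih =>
    intro s x
    rw [List.foldl_cons, ih]
    have hstep : x ∈ stepB s q ↔ x ∈ s ∨ x = q.1 ∨ (q.1 ≠ 0 ∧ 2 ≤ q.2 ∧ x = -q.1) := by
      unfold stepB
      split_ifs with h
      · simp only [PySem.Set.mem_add]; tauto
      · simp only [PySem.Set.mem_add]; tauto
    rw [hstep]
    simp only [List.mem_cons]
    constructor
    · rintro ((h | h | h) | ⟨w, hw, hx⟩)
      · exact Or.inl h
      · exact Or.inr ⟨q, Or.inl rfl, Or.inl h⟩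
      · exact Or.inr ⟨q, Or.inl rfl, Or.inr h⟩
      · exact Or.inr ⟨w, Or.inr hw, hx⟩
    · rintro (h | ⟨w, hw | hw, hx⟩)
      · exact Or.inl (Or.inl h)
      · subst hw; rcases hx with h | h
        · exact Or.inl (Or.inr (Or.inl h))
        · exact Or.inl (Or.inr (Or.inr h))
      · exact Or.inr ⟨w, hw, hx⟩

lemma foldB_nodup : ∀ (l : List (Int × Int)) (s : PySem.Set Int),
    s.Nodup → (l.foldl stepB s).Nodup := by
  intro l
  induction l with
  | nil => intro s hs; exact hs
  | cons q l ih =>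
    intro s hs
    apply ih
    unfold stepB
    split_ifs <;> first
      | exact PySem.Set.nodup_add _ _ (PySem.Set.nodup_add _ _ hs)
      | exact PySem.Set.nodup_add _ _ hs

-- ===== VERDICT (by name: the statement is the Claim_ definition above) =====
theorem solve_spec : Claim_equal_solve := by
  intro a _
  show solve a = solve_alt a
  unfold solve solve_alt
  rw [PySem.Dict.foldl_insert_getD_add_one_eq_counter]
  have hA : ∀ x, x ∈ a.foldl stepA (PySem.Set.empty : PySem.Set Int) ↔ inG a x := by
    intro x
    have := foldA_inG a [] PySem.Set.empty (by intro y; simp [inG, PySem.Set.empty]) x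
    simpa using this
  have hB : ∀ x, x ∈ (PySem.Dict.counter a).items.foldl stepB (PySem.Set.empty : PySem.Set Int) ↔ inG a x := by
    intro x
    rw [foldB_mem, PySem.Dict.items_counter]
    simp only [List.mem_map, PySem.Set.empty]
    constructor
    · rintro (h | ⟨q, ⟨k, hk, rfl⟩, h | ⟨h0, h2, hx⟩⟩)
      · simp at h
      · exact Or.inl (h ▸ (PySem.Set.mem_ofList a k).mp hk)
      · refine Or.inr ⟨k, (PySem.Set.mem_ofList a k).mp hk, h0, ?_, hx⟩
        have h2c : (2:Int) ≤ (a.count k : Int) := h2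
        exact_mod_cast h2c
    · rintro (h | ⟨v, hv, h0, h2, hx⟩)
      · exact Or.inr ⟨(x, (a.count x : Int)), ⟨x, (PySem.Set.mem_ofList a x).mpr h, rfl⟩, Or.inl rfl⟩
      · exact Or.inr ⟨(v, (a.count v : Int)), ⟨v, (PySem.Set.mem_ofList a v).mpr hv, rfl⟩,
          Or.inr ⟨h0, show (2:Int) ≤ (a.count v : Int) from by exact_mod_cast h2, hx⟩⟩
  have hperm : (a.foldl stepA (PySem.Set.empty : PySem.Set Int)).Perm
      ((PySem.Dict.counter a).items.foldl stepB (PySem.Set.empty : PySem.Set Int)) := by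
    rw [List.perm_ext_iff_of_nodup
      (foldA_nodup a _ (by simp [PySem.Set.empty]))
      (foldB_nodup _ _ (by simp [PySem.Set.empty]))]
    intro x; rw [hA, hB]
  show PySem.Set.len _ = PySem.Set.len _
  unfold PySem.Set.len
  exact congrArg Int.ofNat hperm.length_eq
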